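-- pv_equiv track=rewrite | github.com/daniel-reich/ubiquitous-fiesta | aMTXfakahQ45oZbJP_19.py | complete_bracelet
-- ===== SOURCE A (Python) =====
-- def complete_bracelet(lst):
--     pos = []
--     l = len(lst)
--     for i in range(2,l):
--         if l % i == 0:
--             pos.append(i)
--     if len(pos) == 0:
--         return False
--     for item in pos:
--         if lst[:l//item] == lst[l//item:2*(l//item)]:
--             return True
--     return False
-- ===== SOURCE B (Python) =====
-- def complete_bracelet(lst):
--     n = len(lst)
--     # Z-function: z[i] = length of the longest common prefix of lst and lst[i:]
--     z = [0] * n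
--     L = R = 0
--     for i in range(1, n):
--         k = min(R - i, z[i - L]) if i < R else 0
--         while i + k < n and lst[k] == lst[i + k]:
--             k += 1
--         z[i] = k
--         if i + k > R:
--             L, R = i, i + k
--     for d in range(2, n // 2 + 1):
--         if n % d == 0 and z[d] >= d:
--             return True
--     return False
-- ===== Notes on version B (the rewrite author's own statement) =====
-- stated objective: alternative
-- what changed: Replaces the divisor-count loop plus repeated slice comparisons with a single linear Z-function pass (longest common prefix of the list with each suffix) followed by a scan of block lengths d in 2..n//2 testing n % d == 0 and z[d] >= d.
import Mathlib
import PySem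

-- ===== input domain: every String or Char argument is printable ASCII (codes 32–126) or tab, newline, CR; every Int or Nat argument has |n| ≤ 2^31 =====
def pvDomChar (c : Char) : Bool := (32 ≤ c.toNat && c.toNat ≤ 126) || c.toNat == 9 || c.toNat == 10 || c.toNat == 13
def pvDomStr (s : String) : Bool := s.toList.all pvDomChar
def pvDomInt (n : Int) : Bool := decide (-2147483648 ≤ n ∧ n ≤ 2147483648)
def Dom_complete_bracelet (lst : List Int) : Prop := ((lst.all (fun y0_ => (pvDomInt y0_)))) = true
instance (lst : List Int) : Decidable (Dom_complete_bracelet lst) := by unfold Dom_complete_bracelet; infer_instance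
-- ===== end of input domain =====

-- B replaces the divisor-count loop with repeated slice comparisons by one linear
-- Z-function pass plus a scan of the divisor block lengths d in 2..n//2 (alternative
-- algorithm of similar cost; not claimed faster).

-- ===== PORT A =====
def complete_bracelet (lst : List Int) : Bool :=
  let l : Int := (lst.length : Int)
  let pos : List Int :=
    (PySem.List.pyRange 2 l 1).foldl
      (fun acc i => if PySem.Int.mod l i == 0 then acc ++ [i] else acc) []
  if pos.length == 0 then false
  else
    pos.any (fun item =>
      PySem.List.slice lst none (some (PySem.Int.floordiv l item)) ==
      PySem.List.slice lst (some (PySem.Int.floordiv l item))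
        (some (2 * PySem.Int.floordiv l item)))

-- ===== PORT B =====
-- the 'while i + k < n and lst[k] == lst[i + k]: k += 1' inner loop of Source B
def zExtend (s : List Int) (n i k : Nat) : Nat :=
  if _h : i + k < n then
    if s.getD k 0 = s.getD (i + k) 0 then zExtend s n i (k + 1) else k
  else k
termination_by n - (i + k)
decreasing_by omega

-- the 'for i in range(1, n)' Z-function loop of Source B, state (z, L, R)
def zLoop (s : List Int) (n i : Nat) (z : List Nat) (L R : Nat) : List Nat :=
  if _h : i < n then
    let k0 : Nat := if i < R then min (R - i) (z.getD (i - L) 0) else 0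
    let k : Nat := zExtend s n i k0
    let z' : List Nat := z.set i k
    if i + k > R then zLoop s n (i + 1) z' i (i + k) else zLoop s n (i + 1) z' L R
  else z
termination_by n - i

def complete_bracelet_alt (lst : List Int) : Bool :=
  let n : Nat := lst.length
  let z : List Nat := zLoop lst n 1 (List.replicate n 0) 0 0
  (List.range' 2 (n / 2 - 1)).any (fun d => n % d == 0 && decide (d ≤ z.getD d 0))

-- ===== PRECONDITION & SPEC =====
def Spec_complete_bracelet (lst : List Int) (out : Bool) : Prop := out = complete_bracelet_alt lst
instance (lst : List Int) (out : Bool) : Decidable (Spec_complete_bracelet lst out) := by unfold Spec_complete_bracelet; infer_instance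

-- ===== CLAIM (what is proved, stated in full; the proofs are below) =====
def Claim_equal_complete_bracelet : Prop := ∀ (lst : List Int), Dom_complete_bracelet lst → Spec_complete_bracelet lst (complete_bracelet lst)

-- ===== LEMMAS AND PROOFS =====

-- longest common prefix length of two lists (the value z[i] must equal at i)
def lcpLen : List Int → List Int → Nat
  | a :: as, b :: bs => if a = b then lcpLen as bs + 1 else 0
  | _, _ => 0

theorem getD_drop' (s : List Int) (i j : Nat) :
    (s.drop i).getD j 0 = s.getD (i + j) 0 := by
  simp [List.getD_eq_getElem?_getD, List.getElem?_drop]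

theorem lcpLen_nil_left (b : List Int) : lcpLen [] b = 0 := by cases b <;> rfl

theorem lcpLen_nil_right (a : List Int) : lcpLen a [] = 0 := by cases a <;> rfl

theorem lcpLen_cons (x y : Int) (as bs : List Int) :
    lcpLen (x :: as) (y :: bs) = if x = y then lcpLen as bs + 1 else 0 := rfl

theorem lcpLen_ge_iff (a : List Int) : ∀ (b : List Int) (k : Nat),
    k ≤ lcpLen a b ↔
      k ≤ a.length ∧ k ≤ b.length ∧ ∀ j, j < k → a.getD j 0 = b.getD j 0 := by
  induction a with
  | nil =>
      intro b k
      simp only [lcpLen_nil_left, List.length_nil]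
      constructor
      · intro h; exact ⟨h, by omega, fun j hj => absurd hj (by omega)⟩
      · exact fun h => h.1
  | cons x as ih =>
      intro b k
      cases b with
      | nil =>
          simp only [lcpLen_nil_right, List.length_nil]
          constructor
          · intro h; exact ⟨by omega, h, fun j hj => absurd hj (by omega)⟩
          · exact fun h => h.2.1
      | cons y bs =>
          cases k with
          | zero => simp
          | succ k =>
              simp only [lcpLen_cons, List.length_cons]
              by_cases hxy : x = y
              · rw [if_pos hxy, Nat.add_le_add_iff_right, ih bs k]
                constructor
                · rintro ⟨h1, h2, h3⟩
                  refine ⟨by omega, by omega, ?_⟩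
                  intro j hj
                  cases j with
                  | zero => simpa using hxy
                  | succ j => simpa using h3 j (by omega)
                · rintro ⟨h1, h2, h3⟩
                  refine ⟨by omega, by omega, ?_⟩
                  intro j hj
                  simpa using h3 (j + 1) (by omega)
              · rw [if_neg hxy]
                constructor
                · intro h; exact absurd h (by omega)
                · rintro ⟨h1, h2, h3⟩
                  exact absurd (by simpa using h3 0 (by omega)) hxy

theorem lcpLen_le_right (a b : List Int) : lcpLen a b ≤ b.length := by
  have h := (lcpLen_ge_iff a b (lcpLen a b)).mp le_rfl
  exact h.2.1

theorem lcpLen_matches (a b : List Int) :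
    ∀ j, j < lcpLen a b → a.getD j 0 = b.getD j 0 := by
  have h := (lcpLen_ge_iff a b (lcpLen a b)).mp le_rfl
  exact h.2.2

theorem lcpLen_mismatch (a : List Int) : ∀ (b : List Int),
    lcpLen a b < a.length → lcpLen a b < b.length →
    a.getD (lcpLen a b) 0 ≠ b.getD (lcpLen a b) 0 := by
  induction a with
  | nil => intro b h1 h2; simp at h1
  | cons x as ih =>
      intro b h1 h2
      cases b with
      | nil => simp at h2
      | cons y bs =>
          by_cases hxy : x = y
          · simp only [lcpLen_cons, if_pos hxy, List.length_cons] at *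
            simpa using ih bs (by omega) (by omega)
          · simp only [lcpLen_cons, if_neg hxy]
            simpa using hxy

theorem zExtend_eq (s : List Int) (i : Nat) (hi : 1 ≤ i) :
    ∀ (m k : Nat), lcpLen s (s.drop i) - k = m → k ≤ lcpLen s (s.drop i) →
    zExtend s s.length i k = lcpLen s (s.drop i) := by
  have hbase := (lcpLen_ge_iff s (s.drop i) (lcpLen s (s.drop i))).mp le_rfl
  have hlend : (s.drop i).length = s.length - i := List.length_drop
  intro m
  induction m with
  | zero =>
      intro k hm hk
      have hkL : k = lcpLen s (s.drop i) := by omega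
      rw [zExtend]
      by_cases hcond : i + k < s.length
      · rw [dif_pos hcond]
        have hlt1 : lcpLen s (s.drop i) < s.length := by omega
        have hlt2 : lcpLen s (s.drop i) < (s.drop i).length := by omega
        have hne := lcpLen_mismatch s (s.drop i) hlt1 hlt2
        rw [getD_drop'] at hne
        rw [if_neg (by rw [hkL]; exact hne)]
        exact hkL
      · rw [dif_neg hcond]; exact hkL
  | succ m ihm =>
      intro k hm hk
      have hklt : k < lcpLen s (s.drop i) := by omega
      have hcond : i + k < s.length := by omega
      have heq : s.getD k 0 = s.getD (i + k) 0 := by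
        have := lcpLen_matches s (s.drop i) k hklt
        rwa [getD_drop'] at this
      rw [zExtend, dif_pos hcond, if_pos heq]
      exact ihm (k + 1) (by omega) (by omega)

-- seed value min(R-i, z[i-L]) is a valid lower bound for z[i]
theorem z_seed_le (s : List Int) (i L R : Nat) (h1 : 1 ≤ L) (h2 : L < i)
    (h3 : i < R) (h4 : R ≤ s.length) (h5 : R - L ≤ lcpLen s (s.drop L)) :
    min (R - i) (lcpLen s (s.drop (i - L))) ≤ lcpLen s (s.drop i) := by
  have hlenL : (s.drop L).length = s.length - L := List.length_drop
  apply (lcpLen_ge_iff s (s.drop i) (min (R - i) (lcpLen s (s.drop (i - L))))).mpr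
  refine ⟨by omega, by simp only [List.length_drop]; omega, ?_⟩
  intro j hj
  rw [getD_drop']
  have hA : s.getD j 0 = s.getD ((i - L) + j) 0 := by
    have := lcpLen_matches s (s.drop (i - L)) j (lt_of_lt_of_le hj (min_le_right _ _))
    rwa [getD_drop'] at this
  have hB : s.getD ((i - L) + j) 0 = s.getD (L + ((i - L) + j)) 0 := by
    have := lcpLen_matches s (s.drop L) ((i - L) + j)
      (by have hj' : j < R - i := lt_of_lt_of_le hj (min_le_left _ _); omega)
    rwa [getD_drop'] at this
  rw [hA, hB]
  congr 1
  omega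

def ZInv (s : List Int) (i : Nat) (z : List Nat) (L R : Nat) : Prop :=
  1 ≤ i ∧ z.length = s.length ∧
  (∀ j, 1 ≤ j → j < i → z.getD j 0 = lcpLen s (s.drop j)) ∧
  (i < R → 1 ≤ L ∧ L < i ∧ R ≤ s.length ∧ R - L ≤ lcpLen s (s.drop L))

theorem getD_set_self (z : List Nat) (i k : Nat) (h : i < z.length) :
    (z.set i k).getD i 0 = k := by
  simp [List.getD_eq_getElem?_getD, h]

theorem getD_set_ne (z : List Nat) (i j k : Nat) (h : i ≠ j) :
    (z.set i k).getD j 0 = z.getD j 0 := by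
  simp [List.getD_eq_getElem?_getD, h]

theorem zLoop_step (s : List Int) (n i : Nat) (z : List Nat) (L R : Nat) (h : i < n) :
    zLoop s n i z L R =
      (if i + zExtend s n i (if i < R then min (R - i) (z.getD (i - L) 0) else 0) > R
       then zLoop s n (i + 1)
          (z.set i (zExtend s n i (if i < R then min (R - i) (z.getD (i - L) 0) else 0)))
          i (i + zExtend s n i (if i < R then min (R - i) (z.getD (i - L) 0) else 0))
       else zLoop s n (i + 1)
          (z.set i (zExtend s n i (if i < R then min (R - i) (z.getD (i - L) 0) else 0)))
          L R) := by
  rw [zLoop, dif_pos h]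

theorem zLoop_correct (s : List Int) : ∀ (m i : Nat) (z : List Nat) (L R : Nat),
    s.length - i = m → ZInv s i z L R →
    ∀ j, 1 ≤ j → (j < i ∨ j < s.length) →
      (zLoop s s.length i z L R).getD j 0 = lcpLen s (s.drop j) := by
  intro m
  induction m with
  | zero =>
      intro i z L R hm hinv j hj1 hj2
      rw [zLoop, dif_neg (by omega)]
      exact hinv.2.2.1 j hj1 (by omega)
  | succ m ihm =>
      intro i z L R hm hinv j hj1 hj2
      obtain ⟨hi1, hzlen, hzvals, hseg⟩ := hinv
      have hin : i < s.length := by omega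
      rw [zLoop_step s s.length i z L R hin]
      have hk0le : (if i < R then min (R - i) (z.getD (i - L) 0) else 0) ≤
          lcpLen s (s.drop i) := by
        by_cases hiR : i < R
        · rw [if_pos hiR]
          obtain ⟨hL1, hL2, hR1, hR2⟩ := hseg hiR
          rw [hzvals (i - L) (by omega) (by omega)]
          exact z_seed_le s i L R hL1 hL2 hiR hR1 hR2
        · rw [if_neg hiR]; omega
      rw [zExtend_eq s i hi1 _ _ rfl hk0le]
      have hz'len : (z.set i (lcpLen s (s.drop i))).length = s.length := by
        simpa using hzlen
      have hz'vals : ∀ j', 1 ≤ j' → j' < i + 1 →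
          (z.set i (lcpLen s (s.drop i))).getD j' 0 = lcpLen s (s.drop j') := by
        intro j' h1 h2
        by_cases hji : j' = i
        · subst hji; exact getD_set_self _ _ _ (by omega)
        · rw [getD_set_ne _ _ _ _ (fun h => hji h.symm)]
          exact hzvals j' h1 (by omega)
      have hLile : lcpLen s (s.drop i) ≤ s.length - i := by
        have := lcpLen_le_right s (s.drop i)
        simpa using this
      split_ifs with hbr
      · refine ihm (i + 1) _ i (i + lcpLen s (s.drop i)) (by omega)
          ⟨by omega, hz'len, hz'vals, fun _ => ⟨by omega, by omega, by omega, by omega⟩⟩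
          j hj1 (by omega)
      · refine ihm (i + 1) _ L R (by omega)
          ⟨by omega, hz'len, hz'vals, fun h => ?_⟩ j hj1 (by omega)
        obtain ⟨a, b, c, d⟩ := hseg (by omega)
        exact ⟨a, by omega, c, d⟩

theorem take_eq_iff_lcp (a b : List Int) (d : Nat) (ha : d ≤ a.length)
    (hb : d ≤ b.length) : a.take d = b.take d ↔ d ≤ lcpLen a b := by
  rw [lcpLen_ge_iff]
  constructor
  · intro h
    refine ⟨ha, hb, ?_⟩
    intro j hj
    have hq : (a.take d)[j]? = (b.take d)[j]? := by rw [h]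
    simp only [List.getElem?_take, hj, if_pos] at hq
    simp [List.getD_eq_getElem?_getD, hq]
  · rintro ⟨-, -, h3⟩
    apply List.ext_getElem
    · simp only [List.length_take]; omega
    · intro j hj1 hj2
      simp only [List.getElem_take]
      have hjd : j < d := by simp only [List.length_take] at hj1; omega
      have := h3 j hjd
      rwa [List.getD_eq_getElem _ _ (by omega), List.getD_eq_getElem _ _ (by omega)]
        at this

theorem alt_iff (lst : List Int) :
    complete_bracelet_alt lst = true ↔
      ∃ d : Nat, 2 ≤ d ∧ d ≤ lst.length / 2 ∧ lst.length % d = 0 ∧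
        d ≤ lcpLen lst (lst.drop d) := by
  have hz : ∀ d : Nat, 1 ≤ d → d < lst.length →
      (zLoop lst lst.length 1 (List.replicate lst.length 0) 0 0).getD d 0 =
        lcpLen lst (lst.drop d) := by
    intro d h1 h2
    exact zLoop_correct lst (lst.length - 1) 1 _ 0 0 rfl
      ⟨le_rfl, by simp, fun j hj1 hj2 => absurd hj2 (by omega),
        fun h => absurd h (by omega)⟩ d h1 (Or.inr h2)
  unfold complete_bracelet_alt
  simp only [List.any_eq_true, Bool.and_eq_true, beq_iff_eq, decide_eq_true_eq,
    List.mem_range'_1]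
  constructor
  · rintro ⟨d, ⟨hd2, hdlt⟩, hmod, hle⟩
    refine ⟨d, hd2, by omega, hmod, ?_⟩
    rwa [hz d (by omega) (by omega)] at hle
  · rintro ⟨d, hd2, hd, hmod, hle⟩
    refine ⟨d, ⟨hd2, by omega⟩, hmod, ?_⟩
    rwa [hz d (by omega) (by omega)]

theorem a_iff (lst : List Int) :
    complete_bracelet lst = true ↔
      ∃ d : Nat, 2 ≤ d ∧ d ≤ lst.length / 2 ∧ lst.length % d = 0 ∧
        d ≤ lcpLen lst (lst.drop d) := by
  unfold complete_bracelet
  dsimp only []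
  rw [PySem.List.foldl_append_if_eq_filter]
  have hifany : ∀ (xs : List Int) (f : Int → Bool),
      (if (xs.length == 0 : Bool) = true then false else xs.any f) = xs.any f := by
    intro xs f; cases xs <;> simp
  rw [List.nil_append, hifany]
  simp only [List.any_eq_true, List.mem_filter, PySem.List.mem_pyRange_one,
    beq_iff_eq]
  constructor
  · rintro ⟨x, ⟨⟨hx2, hxlt⟩, hmod⟩, hsl⟩
    obtain ⟨iN, rfl⟩ : ∃ m : Nat, x = (m : Int) :=
      ⟨x.toNat, (Int.toNat_of_nonneg (by omega)).symm⟩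
    have hx2' : 2 ≤ iN := by exact_mod_cast hx2
    have hxlt' : iN < lst.length := by exact_mod_cast hxlt
    have hdvd : iN ∣ lst.length := by
      rw [PySem.Int.mod_eq_zero_iff_dvd] at hmod
      exact_mod_cast hmod
    have h2iN : 2 * iN ≤ lst.length := by
      obtain ⟨q, hq⟩ := hdvd
      match q, hq with
      | 0, hq => omega
      | 1, hq => omega
      | (q' + 2), hq =>
        have : iN * 2 ≤ iN * (q' + 2) := Nat.mul_le_mul_left _ (by omega)
        omega
    have hd2 : 2 ≤ lst.length / iN := (Nat.le_div_iff_mul_le (by omega)).mpr (by omega)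
    have hdle : lst.length / iN ≤ lst.length / 2 := Nat.div_le_div_left hx2' (by omega)
    have hddvd : lst.length / iN ∣ lst.length := Nat.div_dvd_of_dvd hdvd
    rw [PySem.Int.floordiv_natCast, PySem.List.slice_to_natCast] at hsl
    have hcast : (2 : Int) * ((lst.length / iN : Nat) : Int) =
        ((2 * (lst.length / iN) : Nat) : Int) := by push_cast; ring
    rw [hcast, PySem.List.slice_natCast] at hsl
    have hsub : 2 * (lst.length / iN) - lst.length / iN = lst.length / iN := by omega
    rw [hsub] at hsl
    have hmodd : lst.length % (lst.length / iN) = 0 := by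
      obtain ⟨c, hc⟩ := hddvd
      calc lst.length % (lst.length / iN)
          = (lst.length / iN * c) % (lst.length / iN) := by rw [← hc]
        _ = 0 := Nat.mul_mod_right _ _
    refine ⟨lst.length / iN, hd2, hdle, hmodd, ?_⟩
    rw [← take_eq_iff_lcp lst (lst.drop (lst.length / iN)) _ (by omega)
      (by simp only [List.length_drop]; omega)]
    exact hsl
  · rintro ⟨d, hd2, hdle, hmod, hlcp⟩
    have hddvd : d ∣ lst.length := Nat.dvd_of_mod_eq_zero hmod
    have hn4 : 4 ≤ lst.length := by omega
    have hq2 : 2 ≤ lst.length / d := (Nat.le_div_iff_mul_le (by omega)).mpr (by omega)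
    refine ⟨((lst.length / d : Nat) : Int), ⟨⟨by exact_mod_cast hq2, ?_⟩, ?_⟩, ?_⟩
    · exact_mod_cast Nat.div_lt_self (by omega) (by omega)
    · rw [PySem.Int.mod_eq_zero_iff_dvd]
      exact_mod_cast Nat.div_dvd_of_dvd hddvd
    · rw [PySem.Int.floordiv_natCast, Nat.div_div_self hddvd (by omega),
        PySem.List.slice_to_natCast]
      have hcast : (2 : Int) * ((d : Nat) : Int) = ((2 * d : Nat) : Int) := by
        push_cast; ring
      rw [hcast, PySem.List.slice_natCast]
      have hsub : 2 * d - d = d := by omega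
      rw [hsub]
      rw [take_eq_iff_lcp lst (lst.drop d) d (by omega)
        (by simp only [List.length_drop]; omega)]
      exact hlcp

-- ===== VERDICT (by name: the statement is the Claim_ definition above) =====
theorem complete_bracelet_spec : Claim_equal_complete_bracelet := by
  intro lst _
  unfold Spec_complete_bracelet
  have := (a_iff lst).trans (alt_iff lst).symm
  cases ha : complete_bracelet lst <;> cases hb : complete_bracelet_alt lst <;>
    simp_all
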